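-- pv_equiv track=rewrite | github.com/sumedha25bce10764-del/Movie-Recommendations-System-using-Machine-Learning | sourcecode/main.py | get_mood
-- ===== SOURCE A (Python) =====
-- def get_mood(genre_list):
--     genres = [g["name"] for g in genre_list]
--
--     if "Comedy" in genres or "Family" in genres:
--         return "Happy"
--     elif "Romance" in genres:
--         return "Romantic"
--     elif "Drama" in genres:
--         return "Sad"
--     elif "Action" in genres or "Adventure" in genres or "Science Fiction" in genres:
--         return "Excited"
--     elif "Horror" in genres or "Thriller" in genres:
--         return "Scared"
--     else:
--         return "Other"
-- ===== SOURCE B (Python) =====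
-- PRIORITY = {"Comedy": 0, "Family": 0, "Romance": 1, "Drama": 2,
--             "Action": 3, "Adventure": 3, "Science Fiction": 3,
--             "Horror": 4, "Thriller": 4}
-- MOODS = ("Happy", "Romantic", "Sad", "Excited", "Scared", "Other")
--
--
-- def get_mood(genre_list):
--     best = 5
--     for g in genre_list:
--         best = min(best, PRIORITY.get(g["name"], 5))
--     return MOODS[best]
-- ===== Notes on version B (the rewrite author's own statement) =====
-- stated objective: alternative
-- what changed: Replaces A's ordered cascade of up-to-nine membership scans over the name list with a single-pass min-reduction: each genre is mapped to a priority rank via one dict lookup, the minimum rank is accumulated in one loop, and the mood is read off an indexed tuple.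
import Mathlib
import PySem

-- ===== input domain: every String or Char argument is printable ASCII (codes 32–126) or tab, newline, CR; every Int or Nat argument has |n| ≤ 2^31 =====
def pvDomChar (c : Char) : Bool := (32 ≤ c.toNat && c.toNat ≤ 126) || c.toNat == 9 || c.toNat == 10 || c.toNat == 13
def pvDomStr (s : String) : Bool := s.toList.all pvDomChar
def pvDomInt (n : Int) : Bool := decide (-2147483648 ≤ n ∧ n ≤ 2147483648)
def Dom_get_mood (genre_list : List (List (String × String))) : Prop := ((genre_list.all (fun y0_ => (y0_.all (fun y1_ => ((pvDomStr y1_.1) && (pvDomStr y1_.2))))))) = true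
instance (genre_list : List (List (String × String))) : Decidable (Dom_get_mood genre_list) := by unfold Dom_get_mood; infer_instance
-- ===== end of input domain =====

-- B replaces A's ordered cascade of membership scans with a one-pass minimum over priority
-- ranks (dict lookup per genre, then index a mood table); same return value on Pre_.

-- ===== PORT A =====
-- g["name"]: first-match association-list lookup; total via "" default, exact under Pre_get_mood
def get_mood (genre_list : List (List (String × String))) : String :=
  let genres := genre_list.map (fun g => (PySem.Dict.mk g).getD "name" "")
  if genres.contains "Comedy" || genres.contains "Family" then "Happy"
  else if genres.contains "Romance" then "Romantic"
  else if genres.contains "Drama" then "Sad"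
  else if genres.contains "Action" || genres.contains "Adventure" || genres.contains "Science Fiction" then "Excited"
  else if genres.contains "Horror" || genres.contains "Thriller" then "Scared"
  else "Other"

-- ===== PORT B =====
def pvPriority : PySem.Dict String Int :=
  PySem.Dict.mk [("Comedy", 0), ("Family", 0), ("Romance", 1), ("Drama", 2),
                 ("Action", 3), ("Adventure", 3), ("Science Fiction", 3),
                 ("Horror", 4), ("Thriller", 4)]

def pvMoods : List String := ["Happy", "Romantic", "Sad", "Excited", "Scared", "Other"]

-- PRIORITY.get(x, 5)
def pvRk (n : String) : Int := pvPriority.getD n 5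

def get_mood_alt (genre_list : List (List (String × String))) : String :=
  let best := genre_list.foldl
    (fun b g => min b (pvRk ((PySem.Dict.mk g).getD "name" ""))) 5
  -- MOODS[best]: best is always in 0..5, so the "" default of pyGet? is unreachable
  (PySem.List.pyGet? pvMoods best).getD ""

-- ===== PRECONDITION & SPEC =====
-- Pre_ excludes exactly the inputs where some inner dict lacks the key "name": there Python A (and B) raises KeyError.
def Pre_get_mood (genre_list : List (List (String × String))) : Prop :=
  (genre_list.all (fun g => g.any (fun kv => kv.1 == "name"))) = true
instance (genre_list : List (List (String × String))) : Decidable (Pre_get_mood genre_list) := by unfold Pre_get_mood; infer_instance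

def pvWitness_get_mood : (List (List (String × String))) := [[("name", "Drama")], [("name", "Comedy")]]

def Spec_get_mood (genre_list : List (List (String × String))) (out : String) : Prop := out = get_mood_alt genre_list
instance (genre_list : List (List (String × String))) (out : String) : Decidable (Spec_get_mood genre_list out) := by unfold Spec_get_mood; infer_instance

-- ===== CLAIM =====
def Claim_equal_get_mood : Prop := ∀ (genre_list : List (List (String × String))), Dom_get_mood genre_list → Pre_get_mood genre_list → Spec_get_mood genre_list (get_mood genre_list)

-- ===== LEMMAS AND PROOFS =====

def pvChain (names : List String) : Int :=
  if names.contains "Comedy" || names.contains "Family" then 0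
  else if names.contains "Romance" then 1
  else if names.contains "Drama" then 2
  else if names.contains "Action" || names.contains "Adventure" || names.contains "Science Fiction" then 3
  else if names.contains "Horror" || names.contains "Thriller" then 4
  else 5

lemma pvChain_le (names : List String) : pvChain names ≤ 5 := by
  unfold pvChain; split_ifs <;> omega

lemma pvChain_cons (n : String) (rest : List String) :
    pvChain (n :: rest) = min (pvRk n) (pvChain rest) := by
  by_cases h1 : n = "Comedy"
  · subst h1
    simp only [pvChain, pvRk, pvPriority, PySem.Dict.getD, PySem.Dict.get?_mk_cons, List.contains_cons]
    simp; split_ifs <;> omega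
  by_cases h2 : n = "Family"
  · subst h2
    simp only [pvChain, pvRk, pvPriority, PySem.Dict.getD, PySem.Dict.get?_mk_cons, List.contains_cons]
    simp; split_ifs <;> omega
  by_cases h3 : n = "Romance"
  · subst h3
    simp only [pvChain, pvRk, pvPriority, PySem.Dict.getD, PySem.Dict.get?_mk_cons, List.contains_cons]
    simp; split_ifs <;> omega
  by_cases h4 : n = "Drama"
  · subst h4
    simp only [pvChain, pvRk, pvPriority, PySem.Dict.getD, PySem.Dict.get?_mk_cons, List.contains_cons]
    simp; split_ifs <;> omega
  by_cases h5 : n = "Action"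
  · subst h5
    simp only [pvChain, pvRk, pvPriority, PySem.Dict.getD, PySem.Dict.get?_mk_cons, List.contains_cons]
    simp; split_ifs <;> omega
  by_cases h6 : n = "Adventure"
  · subst h6
    simp only [pvChain, pvRk, pvPriority, PySem.Dict.getD, PySem.Dict.get?_mk_cons, List.contains_cons]
    simp; split_ifs <;> omega
  by_cases h7 : n = "Science Fiction"
  · subst h7
    simp only [pvChain, pvRk, pvPriority, PySem.Dict.getD, PySem.Dict.get?_mk_cons, List.contains_cons]
    simp; split_ifs <;> omega
  by_cases h8 : n = "Horror"
  · subst h8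
    simp only [pvChain, pvRk, pvPriority, PySem.Dict.getD, PySem.Dict.get?_mk_cons, List.contains_cons]
    simp; split_ifs <;> omega
  by_cases h9 : n = "Thriller"
  · subst h9
    simp only [pvChain, pvRk, pvPriority, PySem.Dict.getD, PySem.Dict.get?_mk_cons, List.contains_cons]
    simp; split_ifs <;> omega
  · have hrk : pvRk n = 5 := by
      simp [pvRk, pvPriority, PySem.Dict.getD, PySem.Dict.get?, beq_iff_eq,
        Ne.symm h1, Ne.symm h2, Ne.symm h3, Ne.symm h4, Ne.symm h5, Ne.symm h6,
        Ne.symm h7, Ne.symm h8, Ne.symm h9]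
    have hc : pvChain (n :: rest) = pvChain rest := by
      simp [pvChain, Ne.symm h1, Ne.symm h2, Ne.symm h3, Ne.symm h4,
        Ne.symm h5, Ne.symm h6, Ne.symm h7, Ne.symm h8, Ne.symm h9]
    rw [hc, hrk]
    have := pvChain_le rest
    omega

lemma pvFold_min (names : List String) (b : Int) (hb : b ≤ 5) :
    names.foldl (fun a n => min a (pvRk n)) b = min b (pvChain names) := by
  induction names generalizing b with
  | nil =>
    simp [pvChain]
    omega
  | cons n rest ih =>
    rw [List.foldl_cons, ih (min b (pvRk n)) (by omega), pvChain_cons]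
    omega

-- ===== VERDICT =====
theorem get_mood_spec : Claim_equal_get_mood := by
  intro gl _ _
  unfold Spec_get_mood get_mood get_mood_alt
  rw [← List.foldl_map (f := fun g => (PySem.Dict.mk g).getD "name" "")
        (g := fun (a : Int) n => min a (pvRk n)),
    pvFold_min _ 5 (by omega)]
  have h5 : min (5 : Int) (pvChain (gl.map fun g => (PySem.Dict.mk g).getD "name" "")) =
      pvChain (gl.map fun g => (PySem.Dict.mk g).getD "name" "") := by
    have := pvChain_le (gl.map fun g => (PySem.Dict.mk g).getD "name" "")
    omega
  rw [h5]
  simp only [pvChain]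
  split_ifs <;> rfl
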